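-- pv_equiv track=rewrite | github.com/simbimbo/ocmemog | ocmemog/doctor.py | _normalize_fixes
-- ===== SOURCE A (Python) =====
-- from collections.abc import Iterable
--
-- def _normalize_fixes(raw: Iterable[str] | None) -> list[str]:
--     actions: list[str] = []
--     if not raw:
--         return actions
--     for item in raw:
--         if not item:
--             continue
--         for part in item.split(","):
--             part = part.strip()
--             if part:
--                 actions.append(part)
--     return sorted(dict.fromkeys(actions).keys())
-- ===== SOURCE B (Python) =====
-- def _normalize_fixes(raw):
--     # Online algorithm: keep `out` sorted and duplicate-free at all times,
--     # inserting each fragment at its sorted position (binary search) as it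
--     # is discovered; no final sort, no dict.
--     out = []
--     if not raw:
--         return out
--     for item in raw:
--         if not item:
--             continue
--         for part in item.split(","):
--             part = part.strip()
--             if not part:
--                 continue
--             lo, hi = 0, len(out)
--             while lo < hi:
--                 mid = (lo + hi) // 2
--                 if out[mid] < part:
--                     lo = mid + 1
--                 else:
--                     hi = mid
--             if lo == len(out) or out[lo] != part:
--                 out.insert(lo, part)
--     return out
-- ===== Notes on version B (the rewrite author's own statement) =====
-- stated objective: alternative
-- what changed: B never calls sorted() or dict.fromkeys: it maintains an always-sorted duplicate-free accumulator online, binary-searching each stripped fragment's position and list.insert-ing it there unless already present, instead of A's collect-everything / dict-dedup / final-sort pipeline.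
import Mathlib
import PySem

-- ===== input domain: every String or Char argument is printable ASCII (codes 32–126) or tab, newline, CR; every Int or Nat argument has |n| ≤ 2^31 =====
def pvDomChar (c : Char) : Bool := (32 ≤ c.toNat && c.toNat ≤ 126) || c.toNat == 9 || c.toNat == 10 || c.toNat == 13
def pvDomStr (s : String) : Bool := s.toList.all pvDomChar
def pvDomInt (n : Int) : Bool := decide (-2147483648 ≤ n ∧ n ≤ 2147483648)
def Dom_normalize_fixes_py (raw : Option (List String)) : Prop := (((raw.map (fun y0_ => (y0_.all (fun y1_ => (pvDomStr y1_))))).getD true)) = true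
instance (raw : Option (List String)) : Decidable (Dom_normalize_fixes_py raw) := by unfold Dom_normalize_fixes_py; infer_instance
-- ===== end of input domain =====

-- B replaces A's collect / dict-dedup / final-sort pipeline by an online algorithm that keeps
-- the accumulator sorted and duplicate-free throughout, inserting each fragment at its sorted
-- position found by binary search (alternative algorithm, no final sort and no dict).

-- ===== PORT A =====
-- literal transliteration of A: nested append loops, then sorted(dict.fromkeys(actions).keys());
-- item.split(",") has a non-empty separator, so Str.split? always returns some (getD [] never fires)
def normalize_fixes_py (raw : Option (List String)) : List String :=
  match raw with
  | none => []
  | some items =>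
    if items = [] then []
    else
      let actions := items.foldl (fun acc item =>
        if item = "" then acc
        else ((PySem.Str.split? item ",").getD []).foldl (fun acc2 part0 =>
          let part := PySem.Str.strip part0
          if part ≠ "" then acc2 ++ [part] else acc2) acc) []
      PySem.List.sorted (PySem.List.dedup actions) (fun x => x) false

-- ===== PORT B =====
-- B-side helper: the binary-search while loop of Source B (lo, hi shrink towards the lower bound);
-- out[mid] is always in range here (0 <= lo <= mid < hi <= len out), so getD is exact
def pvLB (out : List String) (p : String) (lo hi : Nat) : Nat :=
  if h : lo < hi then
    let mid := (lo + hi) / 2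
    if out.getD mid "" < p then pvLB out p (mid + 1) hi else pvLB out p lo mid
  else lo
termination_by hi - lo
decreasing_by all_goals omega

-- B-side helper: body of Source B's innermost block: binary-search lo, then conditional list.insert
def pvIns (p : String) (out : List String) : List String :=
  let lo := pvLB out p 0 out.length
  if lo = out.length || out.getD lo "" != p then PySem.List.insert out (lo : Int) p else out

-- literal transliteration of B: same item/part scan, accumulator updated by sorted insertion
def normalize_fixes_py_alt (raw : Option (List String)) : List String :=
  match raw with
  | none => []
  | some items =>
    if items = [] then []
    else
      items.foldl (fun out item =>
        if item = "" then out
        else ((PySem.Str.split? item ",").getD []).foldl (fun out2 part0 =>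
          let part := PySem.Str.strip part0
          if part ≠ "" then pvIns part out2 else out2) out) []

-- ===== PRECONDITION & SPEC =====
def Spec_normalize_fixes_py (raw : Option (List String)) (out : List String) : Prop := out = normalize_fixes_py_alt raw
instance (raw : Option (List String)) (out : List String) : Decidable (Spec_normalize_fixes_py raw out) := by unfold Spec_normalize_fixes_py; infer_instance

-- ===== CLAIM (what is proved, stated in full; the proofs are below) =====
def Claim_equal_normalize_fixes_py : Prop := ∀ (raw : Option (List String)), Dom_normalize_fixes_py raw → Spec_normalize_fixes_py raw (normalize_fixes_py raw)

-- ===== LEMMAS AND PROOFS =====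

-- the fragments one item contributes
def pvFrag (item : String) : List String :=
  (((PySem.Str.split? item ",").getD []).map PySem.Str.strip).filter (fun p => p ≠ "")

-- A's inner loop appends exactly pvFrag item
theorem pv_inner_a (item : String) :
    ∀ acc : List String,
    ((PySem.Str.split? item ",").getD []).foldl (fun acc2 part0 =>
      let part := PySem.Str.strip part0
      if part ≠ "" then acc2 ++ [part] else acc2) acc = acc ++ pvFrag item := by
  unfold pvFrag
  generalize (PySem.Str.split? item ",").getD [] = ps
  induction ps with
  | nil => intro acc; simp
  | cons h t ih =>
    intro acc
    simp only [List.foldl_cons, List.map_cons, List.filter_cons]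
    by_cases hh : PySem.Str.strip h = ""
    · rw [if_neg (by simp [hh]), if_neg (by simp [hh])]
      exact ih acc
    · rw [if_pos hh, if_pos (by simp [hh]), ih]
      simp
-- A's outer loop builds the flatMap of pvFrag over the non-empty items
theorem pv_outer_a (items : List String) :
    ∀ acc : List String,
    items.foldl (fun acc item =>
      if item = "" then acc
      else ((PySem.Str.split? item ",").getD []).foldl (fun acc2 part0 =>
        let part := PySem.Str.strip part0
        if part ≠ "" then acc2 ++ [part] else acc2) acc) acc
    = acc ++ (items.filter (fun item => item ≠ "")).flatMap pvFrag := by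
  induction items with
  | nil => intro acc; simp
  | cons h t ih =>
    intro acc
    simp only [List.foldl_cons, List.filter_cons]
    by_cases hh : h = ""
    · rw [if_pos hh, if_neg (by simp [hh])]
      exact ih acc
    · rw [if_neg hh, if_pos (by simp [hh]), pv_inner_a h acc, ih]
      simp [List.append_assoc]

-- B's inner loop folds pvIns over pvFrag item
theorem pv_inner_b (item : String) :
    ∀ out : List String,
    ((PySem.Str.split? item ",").getD []).foldl (fun out2 part0 =>
      let part := PySem.Str.strip part0
      if part ≠ "" then pvIns part out2 else out2) out
    = (pvFrag item).foldl (fun o p => pvIns p o) out := by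
  unfold pvFrag
  generalize (PySem.Str.split? item ",").getD [] = ps
  induction ps with
  | nil => intro out; simp
  | cons h t ih =>
    intro out
    simp only [List.foldl_cons, List.map_cons, List.filter_cons]
    by_cases hh : PySem.Str.strip h = ""
    · rw [if_neg (by simp [hh]), if_neg (by simp [hh])]
      exact ih out
    · rw [if_pos hh, if_pos (by simp [hh])]
      simp only [List.foldl_cons]
      exact ih (pvIns (PySem.Str.strip h) out)

-- B's outer loop folds pvIns over the same flatMap
theorem pv_outer_b (items : List String) :
    ∀ out : List String,
    items.foldl (fun out item =>
      if item = "" then out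
      else ((PySem.Str.split? item ",").getD []).foldl (fun out2 part0 =>
        let part := PySem.Str.strip part0
        if part ≠ "" then pvIns part out2 else out2) out) out
    = ((items.filter (fun item => item ≠ "")).flatMap pvFrag).foldl (fun o p => pvIns p o) out := by
  induction items with
  | nil => intro out; simp
  | cons h t ih =>
    intro out
    simp only [List.foldl_cons, List.filter_cons]
    by_cases hh : h = ""
    · rw [if_pos hh, if_neg (by simp [hh])]
      exact ih out
    · rw [if_neg hh, if_pos (by simp [hh]), pv_inner_b h out, ih]
      simp [List.foldl_append]

-- strict sortedness in index (getD) form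
theorem pv_sorted_getD (out : List String) (h : out.Pairwise (fun a b => a < b)) :
    ∀ i j, i < j → j < out.length → out.getD i "" < out.getD j "" := by
  intro i j hij hj
  rw [List.getD_eq_getElem _ _ (lt_trans hij hj), List.getD_eq_getElem _ _ hj]
  exact List.pairwise_iff_getElem.mp h i j (lt_trans hij hj) hj hij

-- the binary search returns a lower bound: everything before it is < p, nothing from it on is
theorem pv_lb_spec (out : List String) (p : String)
    (hs : ∀ i j, i < j → j < out.length → out.getD i "" < out.getD j "") :
    ∀ n lo hi, hi - lo ≤ n → lo ≤ hi → hi ≤ out.length →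
    (∀ i, i < lo → out.getD i "" < p) →
    (∀ i, hi ≤ i → i < out.length → ¬ out.getD i "" < p) →
    (∀ i, i < pvLB out p lo hi → out.getD i "" < p) ∧
    (∀ i, pvLB out p lo hi ≤ i → i < out.length → ¬ out.getD i "" < p) ∧
    pvLB out p lo hi ≤ out.length := by
  intro n
  induction n with
  | zero =>
    intro lo hi hfuel hlohi hhi hlow hhigh
    have : lo = hi := by omega
    rw [pvLB, dif_neg (by omega)]
    exact ⟨hlow, by rw [this] at hlow ⊢; exact hhigh, by omega⟩
  | succ n ih =>
    intro lo hi hfuel hlohi hhi hlow hhigh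
    by_cases hlt : lo < hi
    · rw [pvLB, dif_pos hlt]
      simp only
      by_cases hmid : out.getD ((lo + hi) / 2) "" < p
      · rw [if_pos hmid]
        refine ih ((lo + hi) / 2 + 1) hi (by omega) (by omega) hhi ?_ hhigh
        intro i hi'
        rcases Nat.lt_or_ge i ((lo + hi) / 2) with h | h
        · exact lt_of_lt_of_le (hs i ((lo + hi) / 2) h (by omega)) (le_of_lt hmid)
        · have : i = (lo + hi) / 2 := by omega
          exact this ▸ hmid
      · rw [if_neg hmid]
        refine ih lo ((lo + hi) / 2) (by omega) (by omega) (by omega) hlow ?_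
        intro i hge hilen hcon
        rcases Nat.lt_or_ge ((lo + hi) / 2) i with h | h
        · exact hmid (lt_trans (hs ((lo + hi) / 2) i h hilen) hcon)
        · have : i = (lo + hi) / 2 := by omega
          exact hmid (this ▸ hcon)
    · rw [pvLB, dif_neg hlt]
      have : lo = hi := by omega
      exact ⟨hlow, by rw [this] at hlow ⊢; exact hhigh, by omega⟩

-- pvIns written as take/insert/drop at the lower bound
theorem pv_ins_eq (p : String) (out : List String) (h : out.Pairwise (fun a b => a < b)) :
    (∀ i, i < pvLB out p 0 out.length → out.getD i "" < p) ∧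
    (∀ i, pvLB out p 0 out.length ≤ i → i < out.length → ¬ out.getD i "" < p) ∧
    pvLB out p 0 out.length ≤ out.length := by
  exact pv_lb_spec out p (pv_sorted_getD out h) out.length 0 out.length (by omega) (by omega)
    (le_refl _) (by omega) (by omega)

theorem pv_mem_ins (y p : String) (out : List String)
    (h : out.Pairwise (fun a b => a < b)) : y ∈ pvIns p out ↔ y = p ∨ y ∈ out := by
  obtain ⟨_, hge, hle⟩ := pv_ins_eq p out h
  unfold pvIns
  by_cases hc : pvLB out p 0 out.length = out.length ∨ out.getD (pvLB out p 0 out.length) "" ≠ p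
  · rw [if_pos (by simpa using hc), PySem.List.insert_natCast out _ p hle]
    rw [show (y ∈ out) = (y ∈ out.take (pvLB out p 0 out.length) ++ out.drop (pvLB out p 0 out.length)) by rw [List.take_append_drop]]
    simp only [List.mem_append, List.mem_cons]
    tauto
  · push_neg at hc
    rw [if_neg (by simp [hc.1]; exact hc.2)]
    have hlt : pvLB out p 0 out.length < out.length := lt_of_le_of_ne hle hc.1
    have hp : p ∈ out := by
      rw [← hc.2, List.getD_eq_getElem _ _ hlt]
      exact List.getElem_mem _
    constructor
    · intro hy; exact Or.inr hy
    · rintro (rfl | hy)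
      · exact hp
      · exact hy

theorem pv_ins_sorted (p : String) (out : List String)
    (h : out.Pairwise (fun a b => a < b)) : (pvIns p out).Pairwise (fun a b => a < b) := by
  obtain ⟨hbelow, hge, hle⟩ := pv_ins_eq p out h
  unfold pvIns
  set r := pvLB out p 0 out.length with hr
  by_cases hc : r = out.length ∨ out.getD r "" ≠ p
  · rw [if_pos (by simpa using hc), PySem.List.insert_natCast out _ p hle]
    have htk : ∀ a ∈ out.take r, a < p := by
      intro a ha
      obtain ⟨i, hilen, ha⟩ := List.mem_iff_getElem.mp ha
      have hir : i < r := lt_of_lt_of_le hilen (by simp)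
      have : a = out.getD i "" := by
        rw [List.getD_eq_getElem _ _ (lt_of_lt_of_le hir hle), ← ha, List.getElem_take]
      exact this ▸ hbelow i hir
    have hdp : ∀ b ∈ out.drop r, p < b := by
      intro b hb
      obtain ⟨i, hilen, hb⟩ := List.mem_iff_getElem.mp hb
      have hlen : r + i < out.length := by
        have := hilen; rw [List.length_drop] at this; omega
      have hbv : b = out.getD (r + i) "" := by
        rw [List.getD_eq_getElem _ _ hlen, ← hb, List.getElem_drop]
      have hnl : ¬ out.getD (r + i) "" < p := hge (r + i) (by omega) hlen
      have hne : out.getD (r + i) "" ≠ p := by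
        rcases hc with hc | hc
        · exact absurd hlen (by omega)
        · rcases Nat.eq_or_lt_of_le (show r ≤ r + i by omega) with he | hlt'
          · rw [← he]; exact hc
          · intro hcon
            have hrl : r < out.length := by omega
            have := pv_sorted_getD out h r (r + i) hlt' hlen
            exact hge r (le_refl r) hrl (hcon ▸ this)
      have : p < out.getD (r + i) "" := lt_of_le_of_ne (le_of_not_gt hnl) (Ne.symm hne)
      exact hbv ▸ this
    rw [List.pairwise_append]
    refine ⟨h.sublist (List.take_sublist _ _), ?_, ?_⟩
    · rw [List.pairwise_cons]
      exact ⟨hdp, h.sublist (List.drop_sublist _ _)⟩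
    · intro a ha b hb
      rcases List.mem_cons.mp hb with rfl | hb
      · exact htk a ha
      · exact lt_trans (htk a ha) (hdp b hb)
  · push_neg at hc
    rw [if_neg (by simp [hc.1]; exact hc.2)]
    exact h

-- the fold of pvIns stays sorted and accumulates exactly the members
theorem pv_fold_ins (P : List String) : ∀ out : List String,
    out.Pairwise (fun a b => a < b) →
    (P.foldl (fun o p => pvIns p o) out).Pairwise (fun a b => a < b) ∧
    (∀ y, y ∈ P.foldl (fun o p => pvIns p o) out ↔ y ∈ out ∨ y ∈ P) := by
  induction P with
  | nil => intro out h; exact ⟨h, by simp⟩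
  | cons p Ps ih =>
    intro out h
    have := ih (pvIns p out) (pv_ins_sorted p out h)
    refine ⟨this.1, ?_⟩
    intro y
    rw [List.foldl_cons, (this.2 y), pv_mem_ins y p out h]
    simp [List.mem_cons]
    tauto

-- the heart: A's sorted(dedup P) equals B's online sorted insertion over P
theorem pv_key (P : List String) :
    PySem.List.sorted (PySem.List.dedup P) (fun x => x) false
    = P.foldl (fun o p => pvIns p o) [] := by
  have h := pv_fold_ins P [] (by simp)
  apply PySem.List.sorted_eq_of_perm_of_pairwise_lt
  · refine (List.perm_ext_iff_of_nodup ?_ ?_).mpr ?_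
    · exact h.1.imp ne_of_lt
    · exact PySem.List.nodup_dedup P
    · intro x
      rw [h.2 x, PySem.List.mem_dedup]
      simp
  · exact h.1

-- ===== VERDICT (by name: the statement is the Claim_ definition above) =====
theorem normalize_fixes_py_spec : Claim_equal_normalize_fixes_py := by
  intro raw _
  unfold Spec_normalize_fixes_py normalize_fixes_py normalize_fixes_py_alt
  match raw with
  | none => rfl
  | some items =>
    by_cases hit : items = []
    · simp [hit]
    · simp only [if_neg hit]
      rw [pv_outer_a items [], List.nil_append, pv_outer_b items [], pv_key]
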